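-- pv_equiv track=rewrite | github.com/fcabezasmera/sherlock | scripts/M06_crna.py | max_polyu
-- ===== SOURCE A (Python) =====
-- def max_polyu(seq: str) -> int:
--     """Max consecutive U (or T) run in sequence."""
--     seq = seq.upper().replace("T", "U")
--     max_run = current = 0
--     for b in seq:
--         if b == "U":
--             current += 1
--             max_run = max(max_run, current)
--         else:
--             current = 0
--     return max_run
-- ===== SOURCE B (Python) =====
-- def max_polyu(seq: str) -> int:
--     """Max consecutive U (or T) run in sequence."""
--     s = seq.upper().replace("T", "U")
--     runs = "".join(c if c == "U" else " " for c in s).split()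
--     return max(map(len, runs), default=0)
-- ===== Notes on version B (the rewrite author's own statement) =====
-- stated objective: idiomatic
-- what changed: B replaces A's explicit two-accumulator running-counter loop by building the maximal U-runs as data (blank out non-U characters, str.split) and reducing with max(..., default=0).
import Mathlib
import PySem

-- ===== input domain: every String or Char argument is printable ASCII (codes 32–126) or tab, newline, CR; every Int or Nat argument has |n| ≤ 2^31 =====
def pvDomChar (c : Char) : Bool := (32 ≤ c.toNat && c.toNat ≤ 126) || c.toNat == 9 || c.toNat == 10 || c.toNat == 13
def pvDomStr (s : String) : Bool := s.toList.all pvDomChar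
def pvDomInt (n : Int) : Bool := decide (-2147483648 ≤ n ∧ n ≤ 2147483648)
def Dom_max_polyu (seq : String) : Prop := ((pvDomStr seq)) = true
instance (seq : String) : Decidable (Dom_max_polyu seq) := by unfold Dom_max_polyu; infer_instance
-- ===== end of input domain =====

-- B builds the maximal U-runs as data (blank out non-U chars, split on whitespace) and reduces
-- with max(..., default=0), instead of A's two-accumulator running-counter loop (idiomatic rewrite).


-- ===== PORT A =====
-- seq = seq.upper().replace("T","U"); max_run = current = 0; for b in seq: ...
def max_polyu (seq : String) : Int :=
  let s := PySem.Str.replace (PySem.Str.upper seq) "T" "U"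
  let r := s.toList.foldl
    (fun (st : Int × Int) b =>
      if b == 'U' then (max st.1 (st.2 + 1), st.2 + 1) else (st.1, 0))
    ((0 : Int), (0 : Int))
  r.1

-- ===== PORT B =====
-- s = seq.upper().replace("T","U"); runs = "".join(c if c=="U" else " " for c in s).split();
-- return max(map(len, runs), default=0)
def max_polyu_alt (seq : String) : Int :=
  let s := PySem.Str.replace (PySem.Str.upper seq) "T" "U"
  let blanked := s.toList.map (fun c => if c == 'U' then c else ' ')
  let runs := PySem.Chars.split₀ blanked
  PySem.List.maxD (runs.map (fun r => (r.length : Int))) (fun x => x) 0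

-- ===== PRECONDITION & SPEC =====
def Spec_max_polyu (seq : String) (out : Int) : Prop := out = max_polyu_alt seq
instance (seq : String) (out : Int) : Decidable (Spec_max_polyu seq out) := by unfold Spec_max_polyu; infer_instance

-- ===== CLAIM (what is proved, stated in full; the proofs are below) =====
def Claim_equal_max_polyu : Prop := ∀ (seq : String), Dom_max_polyu seq → Spec_max_polyu seq (max_polyu seq)

-- ===== LEMMAS AND PROOFS =====

-- maximum run length of a list of runs, 0 for none
def runMax : List (List Char) → Int
  | [] => 0
  | r :: rs => max (r.length : Int) (runMax rs)

theorem runMax_nonneg (rs : List (List Char)) : 0 ≤ runMax rs := by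
  induction rs with
  | nil => simp [runMax]
  | cons r rs ih => simp only [runMax]; omega

theorem runMax_append (rs ts : List (List Char)) :
    runMax (rs ++ ts) = max (runMax rs) (runMax ts) := by
  induction rs with
  | nil => have := runMax_nonneg ts; simp only [List.nil_append, runMax]; omega
  | cons r rs ih => simp only [List.cons_append, runMax, ih]; omega

theorem runMax_reverse (rs : List (List Char)) : runMax rs.reverse = runMax rs := by
  induction rs with
  | nil => rfl
  | cons r rs ih =>
    simp only [List.reverse_cons, runMax_append, ih, runMax]
    have := runMax_nonneg rs; omega

theorem runMax_mem_le {r : List Char} {rs : List (List Char)} (h : r ∈ rs) :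
    (r.length : Int) ≤ runMax rs := by
  induction rs with
  | nil => cases h
  | cons t rs ih =>
    rcases List.mem_cons.mp h with h | h
    · subst h; simp only [runMax]; omega
    · have := ih h; simp only [runMax]; omega

theorem runMax_le {rs : List (List Char)} {m : Int} (h0 : 0 ≤ m)
    (h : ∀ r ∈ rs, (r.length : Int) ≤ m) : runMax rs ≤ m := by
  induction rs with
  | nil => simpa [runMax] using h0
  | cons t ts ih =>
    simp only [runMax]
    have h1 := h t (List.mem_cons_self)
    have h2 := ih (fun r hr => h r (List.mem_cons_of_mem _ hr))
    omega

-- L2: completed runs in acc survive into go's output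
theorem mem_acc_le_runMax_go (bs : List Char) :
    ∀ (cur : List Char) (acc : List (List Char)) (r : List Char), r ∈ acc →
      (r.length : Int) ≤ runMax (PySem.Chars.split₀.go bs cur acc) := by
  induction bs with
  | nil =>
    intro cur acc r hr
    simp only [PySem.Chars.split₀.go]
    split
    · rw [runMax_reverse]; exact runMax_mem_le hr
    · rw [runMax_reverse]; exact runMax_mem_le (List.mem_cons_of_mem _ hr)
  | cons c bs ih =>
    intro cur acc r hr
    simp only [PySem.Chars.split₀.go]
    split
    · split
      · exact ih [] acc r hr
      · exact ih [] (cur.reverse :: acc) r (List.mem_cons_of_mem _ hr)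
    · exact ih (c :: cur) acc r hr

-- L: the pending run cur is ≤ the max of go's output
theorem cur_le_runMax_go (bs : List Char) :
    ∀ (cur : List Char) (acc : List (List Char)),
      (cur.length : Int) ≤ runMax (PySem.Chars.split₀.go bs cur acc) := by
  induction bs with
  | nil =>
    intro cur acc
    simp only [PySem.Chars.split₀.go]
    split
    · rename_i h
      have : cur = [] := by simpa [List.isEmpty_iff] using h
      subst this
      simpa using runMax_nonneg acc.reverse
    · rw [runMax_reverse]
      have : (cur.reverse.length : Int) ≤ runMax (cur.reverse :: acc) :=
        runMax_mem_le (List.mem_cons_self)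
      simpa using this
  | cons c bs ih =>
    intro cur acc
    simp only [PySem.Chars.split₀.go]
    split
    · split
      · rename_i _ h
        have : cur = [] := by simpa [List.isEmpty_iff] using h
        subst this
        simpa using runMax_nonneg _
      · have := mem_acc_le_runMax_go bs [] (cur.reverse :: acc) cur.reverse
          List.mem_cons_self
        simpa using this
    · have := ih (c :: cur) acc
      simp only [List.length_cons] at this
      push_cast at this ⊢
      omega

-- the step function of A's loop
def aStep (st : Int × Int) (b : Char) : Int × Int :=
  if b == 'U' then (max st.1 (st.2 + 1), st.2 + 1) else (st.1, 0)

-- blank of B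
def blank (c : Char) : Char := if c == 'U' then c else ' '

-- main invariant: A's fold over cs equals the max over the runs go extracts from the blanked cs
theorem main_invariant (cs : List Char) :
    ∀ (m : Int) (cur : List Char) (acc : List (List Char)),
      (cur.length : Int) ≤ m → (∀ r ∈ acc, (r.length : Int) ≤ m) →
      (cs.foldl aStep (m, (cur.length : Int))).1 =
        max m (runMax (PySem.Chars.split₀.go (cs.map blank) cur acc)) := by
  induction cs with
  | nil =>
    intro m cur acc hcur hacc
    simp only [List.foldl_nil, List.map_nil, PySem.Chars.split₀.go]
    split
    · rw [runMax_reverse]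
      have : runMax acc ≤ m := runMax_le (le_trans (by positivity) hcur) hacc
      omega
    · rw [runMax_reverse]
      have hmem : ∀ r ∈ cur.reverse :: acc, (r.length : Int) ≤ m := by
        intro r hr
        rcases List.mem_cons.mp hr with h | h
        · subst h; simpa using hcur
        · exact hacc r h
      have : runMax (cur.reverse :: acc) ≤ m := runMax_le (le_trans (by positivity) hcur) hmem
      omega
  | cons c cs ih =>
    intro m cur acc hcur hacc
    simp only [List.foldl_cons, List.map_cons]
    by_cases hU : c = 'U'
    · subst hU
      have hblank : blank 'U' = 'U' := by decide
      rw [hblank]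
      have hstep : aStep (m, (cur.length : Int)) 'U' =
          (max m ((cur.length : Int) + 1), (cur.length : Int) + 1) := by
        simp [aStep]
      rw [hstep]
      have hgo : PySem.Chars.split₀.go ('U' :: cs.map blank) cur acc =
          PySem.Chars.split₀.go (cs.map blank) ('U' :: cur) acc := by
        simp [PySem.Chars.split₀.go, show PySem.Chars.isspace 'U' = false from by decide]
      rw [hgo]
      have hlen : ((('U' :: cur).length : Int)) = (cur.length : Int) + 1 := by
        simp
      have ihres := ih (max m ((cur.length : Int) + 1)) ('U' :: cur) acc
        (by rw [hlen]; omega)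
        (fun r hr => le_trans (hacc r hr) (le_max_left _ _))
      rw [hlen] at ihres
      rw [ihres]
      have hL := cur_le_runMax_go (cs.map blank) ('U' :: cur) acc
      rw [hlen] at hL
      omega
    · have hblank : blank c = ' ' := by simp [blank, hU]
      rw [hblank]
      have hstep : aStep (m, (cur.length : Int)) c = (m, 0) := by
        simp [aStep, hU]
      rw [hstep]
      have hsp : PySem.Chars.isspace ' ' = true := by decide
      by_cases hnil : cur = []
      · subst hnil
        have hgo : PySem.Chars.split₀.go (' ' :: cs.map blank) [] acc =
            PySem.Chars.split₀.go (cs.map blank) [] acc := by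
          simp [PySem.Chars.split₀.go, hsp]
        rw [hgo]
        have := ih m [] acc (by exact le_trans (by positivity) hcur) hacc
        simpa using this
      · have hgo : PySem.Chars.split₀.go (' ' :: cs.map blank) cur acc =
            PySem.Chars.split₀.go (cs.map blank) [] (cur.reverse :: acc) := by
          simp [PySem.Chars.split₀.go, hsp, List.isEmpty_iff, hnil]
        rw [hgo]
        have := ih m [] (cur.reverse :: acc) (by exact le_trans (by positivity) hcur)
          (by
            intro r hr
            rcases List.mem_cons.mp hr with h | h
            · subst h; simpa using hcur
            · exact hacc r h)
        simpa using this

-- B's maxD over the run lengths is runMax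
theorem foldl_max_map_len (t : List (List Char)) :
    ∀ (a : Int), 0 ≤ a →
      (t.map (fun r => (r.length : Int))).foldl max a = max a (runMax t) := by
  induction t with
  | nil => intro a ha; simp [runMax]; omega
  | cons r t ih =>
    intro a ha
    simp only [List.map_cons, List.foldl_cons, runMax]
    rw [ih (max a (r.length : Int)) (by positivity)]
    omega

theorem maxD_eq_runMax (rs : List (List Char)) :
    PySem.List.maxD (rs.map (fun r => (r.length : Int))) (fun x => x) 0 = runMax rs := by
  cases rs with
  | nil => rfl
  | cons r t =>
    simp only [List.map_cons, PySem.List.maxD]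
    rw [PySem.List.max?_id_cons]
    simp only [Option.getD_some]
    rw [foldl_max_map_len t (r.length : Int) (by positivity)]
    simp [runMax]

-- ===== VERDICT (by name: the statement is the Claim_ definition above) =====
theorem max_polyu_spec : Claim_equal_max_polyu := by
  intro seq _
  unfold Spec_max_polyu max_polyu max_polyu_alt
  simp only []
  set cs := (PySem.Str.replace (PySem.Str.upper seq) "T" "U").toList with hcs
  have hstep : (fun (st : Int × Int) b =>
      if b == 'U' then (max st.1 (st.2 + 1), st.2 + 1) else (st.1, (0 : Int))) = aStep := by
    funext st b; rfl
  have hblank : (fun c => if c == 'U' then c else ' ') = blank := by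
    funext c; rfl
  rw [hstep, hblank, maxD_eq_runMax]
  have := main_invariant cs 0 [] [] (by simp) (by simp)
  simpa [PySem.Chars.split₀, runMax_nonneg] using this
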